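-- pv_equiv track=rewrite | github.com/jparr721/DataStructures | scratch/Dijkstra/dijkstra.py | initial
-- ===== SOURCE A (Python) =====
-- def infty(graph):
--     """
--     This function takes a weighted graph as input
--     and returns the sum of all the edge
--     weights + 1 (how they appear on the graph)
--     """
--     total = 0  # Initialize the total to 0
--     visited = []  # Keep track of visited nodes
--     for key, value in graph.items():
--         # Reset to the next val if it was already visited
--         if key in visited:
--             continue
--         visited.append(key)
--         for sub_key in value:
--             if sub_key[0] not in visited:
--                 total += sub_key[1]
--     return total + 1
--
-- def initial(graph):
--     """
--     This makes the "initial" graph where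
--     the root is 0 and the other values are
--     infinity since the optimal path to
--     get there is not yet known at the beginning
--     """
--     inf = infty(graph)  # Get the value of infinity
--     edges = {}  # Keep track of the edges to store them
--     for key, _ in graph.items():
--         # Since A is our root, set it to 0 always
--         if key == "A":
--             edges[key] = 0
--         # Otherwise add the value with inf to the dict
--         else:
--             edges[key] = inf
--     return edges
-- ===== SOURCE B (Python) =====
-- def infty(graph):
--     # One reverse pass: an edge (k -> nb) is counted exactly when nb is not a
--     # key of the graph at all, or nb's row comes strictly after k's row.
--     keys = set(graph)
--     after = set()
--     total = 0
--     for k, nbrs in reversed(list(graph.items())):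
--         total += sum(w for nb, w in nbrs if nb not in keys or nb in after)
--         after.add(k)
--     return total + 1
--
-- def initial(graph):
--     inf = infty(graph)
--     return {k: 0 if k == "A" else inf for k in graph}
-- ===== Notes on version B (the rewrite author's own statement) =====
-- stated objective: faster
-- what changed: infty's forward scan with an incrementally grown `visited` list (linear membership tests per edge) is replaced by one reverse pass over the rows keeping a hash set of the keys already passed plus the precomputed global key set, and `initial` becomes a dict comprehension over the keys.
import Mathlib
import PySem

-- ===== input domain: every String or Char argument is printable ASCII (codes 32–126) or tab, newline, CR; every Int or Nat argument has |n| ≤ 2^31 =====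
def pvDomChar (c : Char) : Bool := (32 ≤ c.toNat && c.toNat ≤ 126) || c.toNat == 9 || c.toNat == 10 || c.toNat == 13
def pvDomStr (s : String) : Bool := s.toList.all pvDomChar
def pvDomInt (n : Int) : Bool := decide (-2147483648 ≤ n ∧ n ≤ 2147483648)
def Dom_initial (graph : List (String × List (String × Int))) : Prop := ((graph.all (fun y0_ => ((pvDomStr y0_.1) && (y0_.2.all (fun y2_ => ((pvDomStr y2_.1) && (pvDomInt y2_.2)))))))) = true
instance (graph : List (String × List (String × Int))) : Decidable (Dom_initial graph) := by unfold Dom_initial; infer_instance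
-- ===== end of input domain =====

-- B replaces A's forward scan with its growing `visited` list (linear membership test per edge) by one
-- reverse pass maintaining a set of the keys already passed plus the precomputed global key set;
-- `initial` itself becomes a comprehension-style map (objective: faster, measured).

-- ===== PORT A =====
-- helper infty of A: forward fold carrying (total, visited list)
def inftyA (graph : List (String × List (String × Int))) : Int :=
  let st := graph.foldl
    (fun (st : Int × List String) kv =>
      if kv.1 ∈ st.2 then st
      else
        let visited := st.2 ++ [kv.1]
        (kv.2.foldl (fun t sk => if sk.1 ∈ visited then t else t + sk.2) st.1, visited))
    (0, [])
  st.1 + 1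

def initial (graph : List (String × List (String × Int))) : List (String × Int) :=
  let inf := inftyA graph
  (graph.foldl
    (fun (edges : PySem.Dict String Int) kv =>
      if kv.1 = "A" then edges.insert kv.1 0 else edges.insert kv.1 inf)
    PySem.Dict.empty).items

-- ===== PORT B =====
-- helper infty of B: reverse fold carrying (total, set of keys already passed = keys after the row)
def inftyB (graph : List (String × List (String × Int))) : Int :=
  let keys : PySem.Set String := PySem.Set.ofList (graph.map (fun kv => kv.1))
  let st := (List.reverse graph).foldl
    (fun (st : Int × PySem.Set String) kv =>
      (st.1 + kv.2.foldl
          (fun t sk =>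
            if !(PySem.Set.contains keys sk.1) || PySem.Set.contains st.2 sk.1 then t + sk.2 else t)
          0,
       PySem.Set.add st.2 kv.1))
    (0, PySem.Set.empty)
  st.1 + 1

-- the dict comprehension over the distinct keys (Pre_) is exactly this map
def initial_alt (graph : List (String × List (String × Int))) : List (String × Int) :=
  let inf := inftyB graph
  graph.map (fun kv => (kv.1, if kv.1 = "A" then 0 else inf))

-- ===== PRECONDITION & SPEC =====
-- Pre_ requires the keys of the association list to be distinct: the argument encodes a
-- Python dict, which cannot carry duplicate keys, so no real input is excluded.
def Pre_initial (graph : List (String × List (String × Int))) : Prop :=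
  (graph.map (fun kv => kv.1)).Nodup
instance (graph : List (String × List (String × Int))) : Decidable (Pre_initial graph) := by
  unfold Pre_initial; infer_instance

def pvWitness_initial : (List (String × List (String × Int))) :=
  [("A", [("B", 2), ("C", 1)]), ("B", [("A", 4), ("C", 3)]), ("C", [])]

def Spec_initial (graph : List (String × List (String × Int))) (out : List (String × Int)) : Prop := out = initial_alt graph
instance (graph : List (String × List (String × Int))) (out : List (String × Int)) : Decidable (Spec_initial graph out) := by unfold Spec_initial; infer_instance

-- ===== CLAIM (what is proved, stated in full; the proofs are below) =====
def Claim_equal_initial : Prop := ∀ (graph : List (String × List (String × Int))), Dom_initial graph → Pre_initial graph → Spec_initial graph (initial graph)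

-- ===== LEMMAS AND PROOFS =====

-- per-row contribution: sum of weights of the edges whose target satisfies p
def pvRow (p : String → Bool) : List (String × Int) → Int
  | [] => 0
  | sk :: v => (if p sk.1 then sk.2 else 0) + pvRow p v

-- common specification: sum of rows, the row at prefix `pre` counting targets outside pre++[key]
def pvS : List (String × List (String × Int)) → List String → Int
  | [], _ => 0
  | kv :: rest, pre =>
      pvRow (fun x => !decide (x ∈ pre ++ [kv.1])) kv.2 + pvS rest (pre ++ [kv.1])

theorem pvRow_congr (p q : String → Bool) (h : ∀ x, p x = q x) :
    ∀ v : List (String × Int), pvRow p v = pvRow q v := by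
  intro v; induction v with
  | nil => rfl
  | cons sk v ih => simp [pvRow, h, ih]

theorem pv_innerA (vis : List String) (v : List (String × Int)) :
    ∀ t : Int,
      v.foldl (fun t sk => if sk.1 ∈ vis then t else t + sk.2) t
        = t + pvRow (fun x => !decide (x ∈ vis)) v := by
  induction v with
  | nil => intro t; simp [pvRow]
  | cons sk v ih =>
      intro t
      simp only [List.foldl_cons, pvRow, ih]
      by_cases h : sk.1 ∈ vis <;> simp [h] <;> ring

theorem pv_innerB (p : String → Bool) (v : List (String × Int)) :
    ∀ t : Int,
      v.foldl (fun t sk => if p sk.1 then t + sk.2 else t) t = t + pvRow p v := by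
  induction v with
  | nil => intro t; simp [pvRow]
  | cons sk v ih =>
      intro t
      simp only [List.foldl_cons, pvRow, ih]
      by_cases h : p sk.1 <;> simp [h] <;> ring

theorem pv_A_fold :
    ∀ (gs : List (String × List (String × Int))) (t : Int) (vis : List String),
      (vis ++ gs.map (fun kv => kv.1)).Nodup →
      gs.foldl
        (fun (st : Int × List String) kv =>
          if kv.1 ∈ st.2 then st
          else
            (kv.2.foldl (fun t sk => if sk.1 ∈ st.2 ++ [kv.1] then t else t + sk.2) st.1,
             st.2 ++ [kv.1]))
        (t, vis)
      = (t + pvS gs vis, vis ++ gs.map (fun kv => kv.1)) := by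
  intro gs
  induction gs with
  | nil => intro t vis _; simp [pvS]
  | cons kv rest ih =>
      intro t vis hnd
      have hkv : kv.1 ∉ vis := by
        rcases List.nodup_append.mp hnd with ⟨_, _, hdisj⟩
        intro hmem
        exact hdisj _ hmem _ (by simp) rfl
      simp only [List.foldl_cons, if_neg hkv]
      rw [pv_innerA (vis ++ [kv.1]) kv.2 t]
      have hnd' : ((vis ++ [kv.1]) ++ rest.map (fun kv => kv.1)).Nodup := by
        simpa [List.append_assoc] using hnd
      rw [ih _ _ hnd']
      simp [pvS, List.append_assoc, add_assoc]

theorem pv_B_fold :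
    ∀ (gs : List (String × List (String × Int))) (pre : List String) (K : PySem.Set String),
      (∀ x, PySem.Set.contains K x = true ↔ x ∈ pre ++ gs.map (fun kv => kv.1)) →
      (pre ++ gs.map (fun kv => kv.1)).Nodup →
      (gs.foldr
        (fun kv (st : Int × PySem.Set String) =>
          (st.1 + kv.2.foldl
              (fun t sk =>
                if !(PySem.Set.contains K sk.1) || PySem.Set.contains st.2 sk.1 then t + sk.2 else t)
              0,
           PySem.Set.add st.2 kv.1))
        (0, PySem.Set.empty)).1 = pvS gs pre
      ∧ ∀ x, x ∈ (gs.foldr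
        (fun kv (st : Int × PySem.Set String) =>
          (st.1 + kv.2.foldl
              (fun t sk =>
                if !(PySem.Set.contains K sk.1) || PySem.Set.contains st.2 sk.1 then t + sk.2 else t)
              0,
           PySem.Set.add st.2 kv.1))
        (0, PySem.Set.empty)).2 ↔ x ∈ gs.map (fun kv => kv.1) := by
  intro gs
  induction gs with
  | nil =>
      intro pre K hK hnd
      exact ⟨rfl, by intro x; simp [PySem.Set.empty]⟩
  | cons kv rest ih =>
      intro pre K hK hnd
      have hK' : ∀ x, PySem.Set.contains K x = true ↔ x ∈ (pre ++ [kv.1]) ++ rest.map (fun kv => kv.1) := by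
        intro x; rw [hK x]; simp [List.append_assoc]
      have hnd' : ((pre ++ [kv.1]) ++ rest.map (fun kv => kv.1)).Nodup := by
        simpa [List.append_assoc] using hnd
      obtain ⟨ihT, ihS⟩ := ih (pre ++ [kv.1]) K hK' hnd'
      simp only [List.foldr_cons]
      set R := rest.foldr
        (fun kv (st : Int × PySem.Set String) =>
          (st.1 + kv.2.foldl
              (fun t sk =>
                if !(PySem.Set.contains K sk.1) || PySem.Set.contains st.2 sk.1 then t + sk.2 else t)
              0,
           PySem.Set.add st.2 kv.1))
        (0, PySem.Set.empty) with hR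
      constructor
      · rw [pv_innerB (fun x => !(PySem.Set.contains K x) || PySem.Set.contains R.2 x) kv.2 0, ihT]
        have hrow :
            pvRow (fun x => !(PySem.Set.contains K x) || PySem.Set.contains R.2 x) kv.2
              = pvRow (fun x => !decide (x ∈ pre ++ [kv.1])) kv.2 := by
          apply pvRow_congr
          intro x
          by_cases hr : x ∈ rest.map (fun kv => kv.1)
          · -- x occurs in a later row: counted on both sides (nodup ⇒ x ∉ pre ++ [kv.1])
            have hx2 : x ∈ R.2 := (ihS x).mpr hr
            have hnp : x ∉ pre ++ [kv.1] := by
              rcases List.nodup_append.mp hnd' with ⟨_, _, hdisj⟩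
              intro hmem; exact hdisj _ hmem _ hr rfl
            simp only [hnp, decide_false, Bool.not_false]
            simp
            exact Or.inr hx2
          · have hx2 : x ∉ R.2 := fun hc => hr ((ihS x).mp hc)
            have hKm : x ∈ K ↔ x ∈ pre ++ [kv.1] := by
              have h0 : x ∈ K ↔ x ∈ pre ++ (kv :: rest).map (fun kv => kv.1) := by
                rw [← hK x]; simp
              rw [h0]
              simp only [List.map_cons, List.mem_append, List.mem_cons]
              tauto
            by_cases hm : x ∈ pre ++ [kv.1]
            · simp only [hm, decide_true, Bool.not_true]
              simp
              exact ⟨hKm.mpr hm, hx2⟩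
            · simp only [hm, decide_false, Bool.not_false]
              simp
              exact Or.inl (fun h => hm (hKm.mp h))
        rw [hrow]
        simp [pvS]; ring
      · intro x
        rw [PySem.Set.mem_add, ihS x]
        simp only [List.map_cons, List.mem_cons]
        tauto

theorem pv_infty_eq (graph : List (String × List (String × Int)))
    (h : Pre_initial graph) : inftyA graph = inftyB graph := by
  simp only [inftyA, inftyB, List.foldl_reverse]
  have hA := pv_A_fold graph 0 [] (by simpa using h)
  have hB := pv_B_fold graph [] (PySem.Set.ofList (graph.map (fun kv => kv.1)))
      (by intro x; simp [PySem.Set.mem_ofList])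
      (by simpa using h)
  rw [hA, hB.1]
  simp

theorem initial_spec : Claim_equal_initial := by
  intro graph _ hpre
  unfold Spec_initial
  simp only [initial, initial_alt]
  rw [pv_infty_eq graph hpre]
  have hfold :
      graph.foldl
        (fun (edges : PySem.Dict String Int) kv =>
          if kv.1 = "A" then edges.insert kv.1 0 else edges.insert kv.1 (inftyB graph))
        PySem.Dict.empty
      = graph.foldl
        (fun (edges : PySem.Dict String Int) kv =>
          edges.insert kv.1 (if kv.1 = "A" then 0 else inftyB graph))
        PySem.Dict.empty := by
    congr 1
    funext edges kv
    by_cases h : kv.1 = "A" <;> simp [h]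
  rw [hfold]
  rw [PySem.Dict.items_foldl_insert_fresh (k := fun kv => kv.1)
        (v := fun kv => if kv.1 = "A" then 0 else inftyB graph)
        (d := PySem.Dict.empty) graph (by intro a _; simp) (by simpa using hpre)]
  simp [PySem.Dict.empty]
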